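-- pv_equiv track=rewrite | github.com/kenerwin88/oregon-trail-deluxe-decompiler | tools/lst_extractor.py | find_score_match
-- ===== SOURCE A (Python) =====
-- def find_score_match(values_dict, target_scores):
--     """Find values that closely match target scores"""
--     if not values_dict:
--         return None
--
--     for value_type, values in values_dict.items():
--         for value in values:
--             if any(abs(value - score) < 10 for score in target_scores):
--                 return value
--     return None
-- ===== SOURCE B (Python) =====
-- def _bisect_left(xs, x):
--     """Leftmost insertion point of x in sorted list xs (hand-written: A imports nothing)."""
--     lo, hi = 0, len(xs)
--     while lo < hi:
--         mid = (lo + hi) // 2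
--         if xs[mid] < x:
--             lo = mid + 1
--         else:
--             hi = mid
--     return lo
--
--
-- def find_score_match(values_dict, target_scores):
--     """Find values that closely match target scores"""
--     if not values_dict:
--         return None
--
--     sorted_targets = sorted(target_scores)
--     for value_type, values in values_dict.items():
--         for value in values:
--             i = _bisect_left(sorted_targets, value)
--             if i < len(sorted_targets) and abs(value - sorted_targets[i]) < 10:
--                 return value
--             if i > 0 and abs(value - sorted_targets[i - 1]) < 10:
--                 return value
--     return None
-- ===== Notes on version B (the rewrite author's own statement) =====
-- stated objective: alternative
-- what changed: The inner linear scan of target_scores per value is replaced by one upfront sort plus a hand-written binary search: only the sorted target at the insertion point and its predecessor are tested.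
import Mathlib
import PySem

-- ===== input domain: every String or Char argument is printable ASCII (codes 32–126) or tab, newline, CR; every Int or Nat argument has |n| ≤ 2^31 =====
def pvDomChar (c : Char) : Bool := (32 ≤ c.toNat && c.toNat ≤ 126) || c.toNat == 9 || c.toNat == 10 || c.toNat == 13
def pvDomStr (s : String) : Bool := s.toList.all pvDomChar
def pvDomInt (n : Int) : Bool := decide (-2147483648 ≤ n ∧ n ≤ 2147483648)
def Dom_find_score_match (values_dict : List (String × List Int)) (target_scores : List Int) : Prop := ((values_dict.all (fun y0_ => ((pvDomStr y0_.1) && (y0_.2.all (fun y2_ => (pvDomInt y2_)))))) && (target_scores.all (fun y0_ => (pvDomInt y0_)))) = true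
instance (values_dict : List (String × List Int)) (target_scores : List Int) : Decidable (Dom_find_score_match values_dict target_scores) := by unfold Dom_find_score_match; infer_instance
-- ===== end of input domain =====

-- B replaces A's per-value linear scan of target_scores by one upfront sort plus a
-- hand-written binary search probing only the insertion point and its predecessor (alternative).

-- ===== PORT A =====
-- inner loop: `for value in values: if any(abs(value-score)<10 for score in target_scores): return value`
def pvInnerA (target_scores : List Int) : List Int → Option Int
  | [] => none
  | v :: rest =>
    if target_scores.any (fun score => decide (|v - score| < 10)) then some v
    else pvInnerA target_scores rest

-- outer loop over values_dict.items()
def pvOuterA (target_scores : List Int) : List (String × List Int) → Option Int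
  | [] => none
  | (_, values) :: rest =>
    match pvInnerA target_scores values with
    | some v => some v
    | none => pvOuterA target_scores rest

def find_score_match (values_dict : List (String × List Int)) (target_scores : List Int) : Option Int :=
  if values_dict = [] then none
  else pvOuterA target_scores values_dict

-- ===== PORT B =====
-- _bisect_left's while-loop: lo, hi moves by binary search (xs[mid] in range whenever lo < hi ≤ len)
def pvBlGo (xs : List Int) (x : Int) (lo hi : Nat) : Nat :=
  if _h : lo < hi then
    let mid := (lo + hi) / 2
    if xs.getD mid 0 < x then pvBlGo xs x (mid + 1) hi
    else pvBlGo xs x lo mid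
  else lo
termination_by hi - lo
decreasing_by all_goals omega

def pvBisectLeft (xs : List Int) (x : Int) : Nat := pvBlGo xs x 0 xs.length

-- inner loop of B: probe sorted_targets[i] and sorted_targets[i-1]
def pvInnerB (st : List Int) : List Int → Option Int
  | [] => none
  | v :: rest =>
    let i := pvBisectLeft st v
    if i < st.length ∧ |v - st.getD i 0| < 10 then some v
    else if 0 < i ∧ |v - st.getD (i - 1) 0| < 10 then some v
    else pvInnerB st rest

def pvOuterB (st : List Int) : List (String × List Int) → Option Int
  | [] => none
  | (_, values) :: rest =>
    match pvInnerB st values with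
    | some v => some v
    | none => pvOuterB st rest

def find_score_match_alt (values_dict : List (String × List Int)) (target_scores : List Int) : Option Int :=
  if values_dict = [] then none
  else pvOuterB (PySem.List.sorted target_scores (fun x => x) false) values_dict

-- ===== PRECONDITION & SPEC =====
def Spec_find_score_match (values_dict : List (String × List Int)) (target_scores : List Int) (out : Option Int) : Prop := out = find_score_match_alt values_dict target_scores
instance (values_dict : List (String × List Int)) (target_scores : List Int) (out : Option Int) : Decidable (Spec_find_score_match values_dict target_scores out) := by unfold Spec_find_score_match; infer_instance

-- ===== CLAIM (what is proved, stated in full; the proofs are below) =====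
def Claim_equal_find_score_match : Prop := ∀ (values_dict : List (String × List Int)) (target_scores : List Int), Dom_find_score_match values_dict target_scores → Spec_find_score_match values_dict target_scores (find_score_match values_dict target_scores)

-- ===== LEMMAS AND PROOFS =====

-- binary-search invariant: pvBlGo returns an index r in [lo,hi] splitting xs into (< x) below and (≥ x) from r on
theorem pvBlGo_spec (xs : List Int) (x : Int) (hs : List.Pairwise (fun a b => a ≤ b) xs) :
    ∀ n lo hi, hi - lo = n → hi ≤ xs.length → lo ≤ hi →
    (∀ j (hj : j < xs.length), j < lo → xs[j] < x) →
    (∀ j (hj : j < xs.length), hi ≤ j → x ≤ xs[j]) →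
    lo ≤ pvBlGo xs x lo hi ∧ pvBlGo xs x lo hi ≤ hi ∧
    (∀ j (hj : j < xs.length), j < pvBlGo xs x lo hi → xs[j] < x) ∧
    (∀ j (hj : j < xs.length), pvBlGo xs x lo hi ≤ j → x ≤ xs[j]) := by
  intro n
  induction n using Nat.strong_induction_on with
  | _ n ih =>
    intro lo hi hn hhi hlh hbelow habove
    rw [pvBlGo]
    by_cases h : lo < hi
    · simp only [h, dif_pos]
      have hmid1 : lo ≤ (lo + hi) / 2 := by omega
      have hmid2 : (lo + hi) / 2 < hi := by omega
      have hmlen : (lo + hi) / 2 < xs.length := by omega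
      have hget : xs.getD ((lo + hi) / 2) 0 = xs[(lo + hi) / 2] := List.getD_eq_getElem xs 0 hmlen
      have hmono := List.pairwise_iff_getElem.mp hs
      by_cases hc : xs.getD ((lo + hi) / 2) 0 < x
      · simp only [hc, if_pos]
        refine (ih (hi - ((lo + hi) / 2 + 1)) (by omega) _ _ rfl hhi (by omega) ?_ habove).imp
          (by omega) id
        intro j hj hjlt
        rcases Nat.lt_or_ge j lo with hl | hl
        · exact hbelow j hj hl
        · have : xs[j] ≤ xs[(lo + hi) / 2] := by
            rcases Nat.lt_or_ge j ((lo + hi) / 2) with hlt | hge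
            · exact hmono j ((lo + hi) / 2) hj hmlen hlt
            · have : j = (lo + hi) / 2 := by omega
              simp [this]
          rw [hget] at hc; omega
      · simp only [hc, if_neg, not_false_iff]
        refine (ih ((lo + hi) / 2 - lo) (by omega) _ _ rfl (by omega) (by omega) hbelow ?_).imp
          id (fun h2 => ⟨by omega, h2.2⟩)
        intro j hj hjge
        have hx : x ≤ xs[(lo + hi) / 2] := by rw [hget] at hc; omega
        have : xs[(lo + hi) / 2] ≤ xs[j] := by
          rcases Nat.lt_or_ge ((lo + hi) / 2) j with hlt | hge
          · exact hmono ((lo + hi) / 2) j hmlen hj hlt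
          · have : j = (lo + hi) / 2 := by omega
            simp [this]
        omega
    · simp only [h, dif_neg, not_false_iff]
      have : lo = hi := by omega
      exact ⟨le_refl _, by omega, fun j hj hjlt => hbelow j hj hjlt,
             fun j hj hjge => habove j hj (by omega)⟩

-- the two-probe check on a sorted list equals "some target is within 10"
theorem pvNear_iff (st : List Int) (v : Int) (hs : List.Pairwise (fun a b => a ≤ b) st) :
    ((pvBisectLeft st v < st.length ∧ |v - st.getD (pvBisectLeft st v) 0| < 10) ∨
     (0 < pvBisectLeft st v ∧ |v - st.getD (pvBisectLeft st v - 1) 0| < 10)) ↔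
    (∃ s ∈ st, |v - s| < 10) := by
  have hspec :=
    pvBlGo_spec st v hs (st.length - 0) 0 st.length rfl (le_refl _) (Nat.zero_le _)
      (fun j hj hjlt => absurd hjlt (Nat.not_lt_zero j)) (fun j hj hjge => absurd hj (by omega))
  rw [show pvBlGo st v 0 st.length = pvBisectLeft st v from rfl] at hspec
  obtain ⟨hlo, hhi, hlt, hge⟩ := hspec
  set i := pvBisectLeft st v with hi
  constructor
  · rintro (⟨h1, h2⟩ | ⟨h1, h2⟩)
    · exact ⟨st[i], List.getElem_mem h1, by rwa [List.getD_eq_getElem st 0 h1] at h2⟩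
    · have hlen : i - 1 < st.length := by omega
      exact ⟨st[i-1], List.getElem_mem hlen, by rwa [List.getD_eq_getElem st 0 hlen] at h2⟩
  · rintro ⟨s, hmem, hnear⟩
    obtain ⟨j, hj, hjs⟩ := List.getElem_of_mem hmem
    have hmono := List.pairwise_iff_getElem.mp hs
    rcases Nat.lt_or_ge j i with hji | hji
    · -- s = st[j] < v, so st[i-1] exists and v - 10 < st[j] ≤ st[i-1] < v
      right
      have h1 : 0 < i := by omega
      have hlen : i - 1 < st.length := by omega
      have hsj : st[j] < v := hlt j hj hji
      have hle : st[j] ≤ st[i-1] := by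
        rcases Nat.lt_or_ge j (i - 1) with h | h
        · exact hmono j (i-1) hj hlen h
        · have : j = i - 1 := by omega
          simp [this]
      have hi1 : st[i-1] < v := hlt (i-1) hlen (by omega)
      rw [List.getD_eq_getElem st 0 hlen]
      constructor
      · exact h1
      · rw [← hjs, abs_sub_lt_iff] at hnear; rw [abs_sub_lt_iff]; omega
    · -- v ≤ s = st[j], so st[i] exists and v ≤ st[i] ≤ st[j] < v + 10
      left
      have hlen : i < st.length := by omega
      have hvi : v ≤ st[i] := hge i hlen (le_refl _)
      have hle : st[i] ≤ st[j] := by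
        rcases Nat.lt_or_ge i j with h | h
        · exact hmono i j hlen hj h
        · have : j = i := by omega
          simp [this]
      rw [List.getD_eq_getElem st 0 hlen]
      constructor
      · exact hlen
      · rw [← hjs, abs_sub_lt_iff] at hnear; rw [abs_sub_lt_iff]; omega

theorem pvInner_eq (target_scores : List Int) (values : List Int) :
    pvInnerA target_scores values =
    pvInnerB (PySem.List.sorted target_scores (fun x => x) false) values := by
  induction values with
  | nil => rfl
  | cons v rest ihv =>
    set st := PySem.List.sorted target_scores (fun x => x) false with hst
    have hs : List.Pairwise (fun a b : Int => a ≤ b) st :=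
      PySem.List.sorted_pairwise target_scores (fun x => x)
    have hmem : ∀ s : Int, s ∈ st ↔ s ∈ target_scores := fun s =>
      PySem.List.mem_sorted target_scores (fun x => x) false s
    have hAcond : (target_scores.any (fun score => decide (|v - score| < 10)) = true) ↔
        (∃ s ∈ st, |v - s| < 10) := by
      rw [List.any_eq_true]
      constructor
      · rintro ⟨s, hm, hd⟩; exact ⟨s, (hmem s).mpr hm, of_decide_eq_true hd⟩
      · rintro ⟨s, hm, hd⟩; exact ⟨s, (hmem s).mp hm, decide_eq_true hd⟩
    rw [pvInnerA, pvInnerB]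
    by_cases hA : target_scores.any (fun score => decide (|v - score| < 10)) = true
    · have := (pvNear_iff st v hs).mpr (hAcond.mp hA)
      simp only [hA, if_true]
      rcases this with h | h
      · rw [if_pos h]
      · by_cases h1 : pvBisectLeft st v < st.length ∧ |v - st.getD (pvBisectLeft st v) 0| < 10
        · rw [if_pos h1]
        · rw [if_neg h1, if_pos h]
    · have hnone : ¬ ((pvBisectLeft st v < st.length ∧ |v - st.getD (pvBisectLeft st v) 0| < 10) ∨
          (0 < pvBisectLeft st v ∧ |v - st.getD (pvBisectLeft st v - 1) 0| < 10)) := by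
        intro h
        exact hA (hAcond.mpr ((pvNear_iff st v hs).mp h))
      rw [if_neg hA, if_neg (fun h => hnone (Or.inl h)), if_neg (fun h => hnone (Or.inr h)), ihv]

theorem pvOuter_eq (target_scores : List Int) (vd : List (String × List Int)) :
    pvOuterA target_scores vd =
    pvOuterB (PySem.List.sorted target_scores (fun x => x) false) vd := by
  induction vd with
  | nil => rfl
  | cons p rest ihr =>
    obtain ⟨k, values⟩ := p
    rw [pvOuterA, pvOuterB, pvInner_eq, ihr]

-- ===== VERDICT (by name: the statement is the Claim_ definition above) =====
theorem find_score_match_spec : Claim_equal_find_score_match := by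
  intro vd ts _
  unfold Spec_find_score_match find_score_match find_score_match_alt
  by_cases h : vd = []
  · simp [h]
  · rw [if_neg h, if_neg h, pvOuter_eq]
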